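-- pv_equiv track=rewrite | github.com/pypi-data/pypi-mirror-134 | packages/bafficommons/bafficommons-0.0.17-py3-none-any.whl/bafficommons/runner/baffialgorithms/winnowing/impl/preprocessors/preprocesser.py | process_tokens
-- ===== SOURCE A (Python) =====
-- NEW_LINE = '\n'
--
-- def process_tokens(tokens):
--     processed_tokens = []
--     line_count = 1
--     for token in tokens:
--         token_value, raw_code = token
--         processed_tokens.append((token_value, line_count, raw_code))
--         line_count += raw_code.count(NEW_LINE)
--     return processed_tokens
-- ===== SOURCE B (Python) =====
-- NEW_LINE = '\n'
--
-- def process_tokens(tokens):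
--     toks = list(tokens)
--     counts = [raw.count(NEW_LINE) for _, raw in toks]
--     lines = [1]
--     for c in counts:
--         lines.append(lines[-1] + c)
--     return [(tv, ln, raw) for (tv, raw), ln in zip(toks, lines)]
-- ===== Notes on version B (the rewrite author's own statement) =====
-- stated objective: alternative
-- what changed: Replaces the single incremental pass carrying a running line counter with a three-stage decomposition: a newline-count table, an exclusive prefix-sum list of line numbers, and a zip/combine pass.
import Mathlib
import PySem

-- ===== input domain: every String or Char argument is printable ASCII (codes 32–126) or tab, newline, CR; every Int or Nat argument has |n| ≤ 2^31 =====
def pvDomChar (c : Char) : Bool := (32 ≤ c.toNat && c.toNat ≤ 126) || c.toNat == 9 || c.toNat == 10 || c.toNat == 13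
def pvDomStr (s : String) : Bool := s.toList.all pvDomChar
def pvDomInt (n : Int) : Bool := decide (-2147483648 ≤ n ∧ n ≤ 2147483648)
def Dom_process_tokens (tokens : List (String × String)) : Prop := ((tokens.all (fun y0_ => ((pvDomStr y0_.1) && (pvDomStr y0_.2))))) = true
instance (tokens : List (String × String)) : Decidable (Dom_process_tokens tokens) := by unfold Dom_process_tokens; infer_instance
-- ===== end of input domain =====

-- B decomposes A's single stateful pass into a newline-count table, an exclusive prefix-sum of line numbers, and a zip/combine pass (alternative decomposition, same cost).


-- ===== PORT A =====
def process_tokens (tokens : List (String × String)) : List (String × Int × String) :=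
  (tokens.foldl
    (fun (st : List (String × Int × String) × Int) token =>
      (st.1 ++ [(token.1, st.2, token.2)], st.2 + (PySem.Str.count token.2 "\n" : Int)))
    ([], 1)).1

-- ===== PORT B =====
def process_tokens_alt (tokens : List (String × String)) : List (String × Int × String) :=
  let toks := tokens
  let counts : List Int := toks.map (fun t => (PySem.Str.count t.2 "\n" : Int))
  let lines : List Int := counts.foldl (fun ls c => ls ++ [ls.getLast! + c]) [1]
  (toks.zip lines).map (fun p => (p.1.1, p.2, p.1.2))

-- ===== PRECONDITION & SPEC =====
def Spec_process_tokens (tokens : List (String × String)) (out : List (String × Int × String)) : Prop := out = process_tokens_alt tokens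
instance (tokens : List (String × String)) (out : List (String × Int × String)) : Decidable (Spec_process_tokens tokens out) := by unfold Spec_process_tokens; infer_instance

-- ===== CLAIM (what is proved, stated in full; the proofs are below) =====
def Claim_equal_process_tokens : Prop := ∀ (tokens : List (String × String)), Dom_process_tokens tokens → Spec_process_tokens tokens (process_tokens tokens)

-- ===== LEMMAS AND PROOFS =====

-- ===== VERDICT (by name: the statement is the Claim_ definition above) =====
-- reference form: the cons-recursive annotation with a running line number
def ptSpec : List (String × String) → Int → List (String × Int × String)
  | [], _ => []
  | (tv, raw) :: rest, lc =>
      (tv, lc, raw) :: ptSpec rest (lc + (PySem.Str.count raw "\n" : Int))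

-- exclusive prefix sums of a count list from a running value
def ptScan : Int → List Int → List Int
  | _, [] => []
  | lc, c :: cs => (lc + c) :: ptScan (lc + c) cs

theorem ptA_foldl (toks : List (String × String)) (acc : List (String × Int × String)) (lc : Int) :
    (toks.foldl
      (fun (st : List (String × Int × String) × Int) token =>
        (st.1 ++ [(token.1, st.2, token.2)], st.2 + (PySem.Str.count token.2 "\n" : Int)))
      (acc, lc)).1 = acc ++ ptSpec toks lc := by
  induction toks generalizing acc lc with
  | nil => simp [ptSpec]
  | cons t rest ih =>
      obtain ⟨tv, raw⟩ := t
      simp only [List.foldl, ptSpec]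
      rw [ih]
      simp

theorem ptB_lines (cs : List Int) (ls : List Int) (h : ls ≠ []) :
    cs.foldl (fun ls c => ls ++ [ls.getLast! + c]) ls = ls ++ ptScan ls.getLast! cs := by
  induction cs generalizing ls with
  | nil => simp [ptScan]
  | cons c rest ih =>
      simp only [List.foldl, ptScan]
      rw [ih (ls ++ [ls.getLast! + c]) (by simp)]
      simp [List.getLast!_eq_getLast?_getD]

theorem ptB_zip (toks : List (String × String)) (lc : Int) :
    (toks.zip (lc :: ptScan lc (toks.map (fun t => (PySem.Str.count t.2 "\n" : Int))))).map
        (fun p => (p.1.1, p.2, p.1.2)) = ptSpec toks lc := by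
  induction toks generalizing lc with
  | nil => rfl
  | cons t rest ih =>
      obtain ⟨tv, raw⟩ := t
      simp only [List.map, ptScan, ptSpec, List.zip_cons_cons]
      rw [← ih]

theorem process_tokens_spec : Claim_equal_process_tokens := by
  intro tokens _
  show process_tokens tokens = process_tokens_alt tokens
  show (tokens.foldl
      (fun (st : List (String × Int × String) × Int) token =>
        (st.1 ++ [(token.1, st.2, token.2)], st.2 + (PySem.Str.count token.2 "\n" : Int)))
      ([], 1)).1
    = ((tokens.zip ((tokens.map (fun t => (PySem.Str.count t.2 "\n" : Int))).foldl
          (fun ls c => ls ++ [ls.getLast! + c]) [1])).map (fun p => (p.1.1, p.2, p.1.2)))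
  rw [ptA_foldl, ptB_lines _ [1] (by simp)]
  simpa using (ptB_zip tokens 1).symm
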